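-- pv_equiv track=rewrite | github.com/ModerRAS/mountblade-code | TaleWorlds.Native/src/scripts/beautify_05_networking_remaining.py | rename_variables
-- ===== SOURCE A (Python) =====
-- def rename_variables(content):
--     """重命名变量"""
--     variable_mappings = {
--         'BoolFlag': 'ResourceCleanupFlag',
--         'uStackX_24': 'StackParameterHigh',
--         'lStack0000000000000028': 'StackParameterLow',
--         'in_XMM0_Qb': 'Xmm0Parameter'
--     }
--
--     for old_name, new_name in variable_mappings.items():
--         content = content.replace(old_name, new_name)
--
--     return content
-- ===== SOURCE B (Python) =====
-- def rename_variables(content):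
--     """重命名变量"""
--     replacements = [
--         ('BoolFlag', 'ResourceCleanupFlag'),
--         ('uStackX_24', 'StackParameterHigh'),
--         ('lStack0000000000000028', 'StackParameterLow'),
--         ('in_XMM0_Qb', 'Xmm0Parameter'),
--     ]
--     # Single left-to-right pass: at each position try the mapped names in
--     # order; on a match emit the replacement and jump past it, otherwise
--     # copy one character.  Equivalent to A's four sequential whole-string
--     # replaces because the names do not overlap one another and no
--     # replacement contains (or overlaps into) a mapped name.
--     out = []
--     i = 0
--     n = len(content)
--     while i < n:
--         for old_name, new_name in replacements:
--             if content.startswith(old_name, i):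
--                 out.append(new_name)
--                 i += len(old_name)
--                 break
--         else:
--             out.append(content[i])
--             i += 1
--     return ''.join(out)
-- ===== Notes on version B (the rewrite author's own statement) =====
-- stated objective: alternative
-- what changed: Replaces A's four sequential whole-string str.replace passes by one left-to-right scan that tries the mapped names from the dict at each position and copies or substitutes as it goes (equivalent because the names are mutually non-overlapping and no replacement contains or overlaps into a name).
import Mathlib
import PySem

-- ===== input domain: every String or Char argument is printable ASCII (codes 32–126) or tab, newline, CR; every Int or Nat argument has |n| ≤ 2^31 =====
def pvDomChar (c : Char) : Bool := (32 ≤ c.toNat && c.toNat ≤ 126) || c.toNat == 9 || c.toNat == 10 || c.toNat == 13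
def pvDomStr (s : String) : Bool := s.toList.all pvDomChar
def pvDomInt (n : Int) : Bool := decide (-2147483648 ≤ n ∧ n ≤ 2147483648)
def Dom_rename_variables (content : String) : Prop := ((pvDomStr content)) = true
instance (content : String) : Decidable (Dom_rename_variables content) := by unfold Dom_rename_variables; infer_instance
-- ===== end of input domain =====

-- B replaces A's four sequential whole-string replaces by ONE left-to-right scan with a
-- lookup table (alternative decomposition, same result; no speed claim).

-- ===== PORT A =====
-- A: for old,new in dict.items(): content = content.replace(old,new)
def rename_variables (content : String) : String :=
  let variable_mappings : PySem.Dict String String := PySem.Dict.mk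
    [("BoolFlag", "ResourceCleanupFlag"),
     ("uStackX_24", "StackParameterHigh"),
     ("lStack0000000000000028", "StackParameterLow"),
     ("in_XMM0_Qb", "Xmm0Parameter")]
  variable_mappings.items.foldl (fun content p => PySem.Str.replace content p.1 p.2) content

-- ===== PORT B =====
-- B-side constants: Source B's dict items over code points (PySem string ops live on List Char).

def pvK1 : List Char := ['B', 'o', 'o', 'l', 'F', 'l', 'a', 'g']
def pvV1 : List Char := ['R', 'e', 's', 'o', 'u', 'r', 'c', 'e', 'C', 'l', 'e', 'a', 'n', 'u', 'p', 'F', 'l', 'a', 'g']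
def pvK2 : List Char := ['u', 'S', 't', 'a', 'c', 'k', 'X', '_', '2', '4']
def pvV2 : List Char := ['S', 't', 'a', 'c', 'k', 'P', 'a', 'r', 'a', 'm', 'e', 't', 'e', 'r', 'H', 'i', 'g', 'h']
def pvK3 : List Char := ['l', 'S', 't', 'a', 'c', 'k', '0', '0', '0', '0', '0', '0', '0', '0', '0', '0', '0', '0', '0', '0', '2', '8']
def pvV3 : List Char := ['S', 't', 'a', 'c', 'k', 'P', 'a', 'r', 'a', 'm', 'e', 't', 'e', 'r', 'L', 'o', 'w']
def pvK4 : List Char := ['i', 'n', '_', 'X', 'M', 'M', '0', '_', 'Q', 'b']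
def pvV4 : List Char := ['X', 'm', 'm', '0', 'P', 'a', 'r', 'a', 'm', 'e', 't', 'e', 'r']

def pvMapB : List (List Char × List Char) :=
  [(pvK1, pvV1), (pvK2, pvV2), (pvK3, pvV3), (pvK4, pvV4)]

-- Source B's while loop: at position i try the mapped names in dict order (content.startswith),
-- on a match emit the replacement and jump past the name, else copy one character; ported as
-- structural recursion on the remaining characters (''.join(out) is the concatenation built
-- up).  On a match Source B advances by len(old); here the matched head c is already peeled off,
-- so the scan continues at t.drop (old.length - 1) = (c :: t).drop old.length (keys nonempty).
def renameGo : List Char → List Char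
  | [] => []
  | c :: t =>
    match pvMapB.find? (fun kv => kv.1.isPrefixOf (c :: t)) with
    | some kv => kv.2 ++ renameGo (t.drop (kv.1.length - 1))
    | none => c :: renameGo t
termination_by s => s.length
decreasing_by
  · simp only [List.length_drop, List.length_cons]; omega
  · simp only [List.length_cons]; omega

def rename_variables_alt (content : String) : String :=
  String.ofList (renameGo content.toList)

-- ===== PRECONDITION & SPEC =====
def Spec_rename_variables (content : String) (out : String) : Prop := out = rename_variables_alt content
instance (content : String) (out : String) : Decidable (Spec_rename_variables content out) := by unfold Spec_rename_variables; infer_instance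

-- ===== CLAIM (what is proved, stated in full; the proofs are below) =====
def Claim_equal_rename_variables : Prop := ∀ (content : String), Dom_rename_variables content → Spec_rename_variables content (rename_variables content)

-- ===== LEMMAS AND PROOFS =====

-- fuel-free reference form of PySem.Chars.replace (for a nonempty pattern)
def pvRepl (old new : List Char) : List Char → List Char
  | [] => []
  | c :: t =>
    if old.isPrefixOf (c :: t) then new ++ pvRepl old new (t.drop (old.length - 1))
    else c :: pvRepl old new t
termination_by s => s.length
decreasing_by
  · simp only [List.length_drop, List.length_cons]; omega
  · simp only [List.length_cons]; omega

lemma renameGo_cons (c : Char) (t : List Char) : renameGo (c :: t) =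
    match pvMapB.find? (fun kv => kv.1.isPrefixOf (c :: t)) with
    | some kv => kv.2 ++ renameGo (t.drop (kv.1.length - 1))
    | none => c :: renameGo t := by
  rw [renameGo]

-- no suffix of a crosses into b in either direction (checked positionwise)
def pcross (a b : List Char) : Bool :=
  (List.range a.length).all fun d => !((a.drop d).isPrefixOf b) && !(b.isPrefixOf (a.drop d))

lemma pcross_spec {a b : List Char} (h : pcross a b = true) {d : Nat} (hd : d < a.length) :
    ¬ (a.drop d <+: b) ∧ ¬ (b <+: a.drop d) := by
  simp only [pcross, List.all_eq_true, List.mem_range, Bool.and_eq_true, Bool.not_eq_true'] at h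
  have := h d hd
  exact ⟨fun hp => by simp [List.isPrefixOf_iff_prefix.mpr hp] at this,
         fun hp => by simp [List.isPrefixOf_iff_prefix.mpr hp] at this⟩

lemma pcross_tail {q : Char} {p b : List Char} (h : pcross (q :: p) b = true) :
    pcross p b = true := by
  simp only [pcross, List.all_eq_true, List.mem_range] at h ⊢
  intro d hd
  exact h (d + 1) (by simp; omega)

lemma isPrefixOf_false {a b : List Char} (h : ¬ a <+: b) : a.isPrefixOf b = false := by
  rw [Bool.eq_false_iff]
  intro hh
  exact h (List.isPrefixOf_iff_prefix.mp hh)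

lemma not_prefix_append {a p : List Char} (X : List Char) (h1 : ¬ a <+: p) (h2 : ¬ p <+: a) :
    ¬ a <+: p ++ X :=
  fun h => (List.prefix_or_prefix_of_prefix h (List.prefix_append p X)).elim h1 h2

-- PySem.Chars.replace.go with enough fuel computes pvRepl
lemma go_eq (old new : List Char) (hold : old ≠ []) :
    ∀ (fuel : Nat) (l acc : List Char), l.length ≤ fuel →
      PySem.Chars.replace.go old new fuel l acc = acc.reverse ++ pvRepl old new l := by
  intro fuel
  induction fuel with
  | zero =>
    intro l acc hl
    have : l = [] := List.length_eq_zero_iff.mp (Nat.le_zero.mp hl)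
    subst this
    rw [PySem.Chars.replace.go.eq_def]
    simp [pvRepl]
  | succ n ih =>
    intro l acc hl
    rw [PySem.Chars.replace.go.eq_def]
    cases l with
    | nil => simp [pvRepl]
    | cons c t =>
      simp only [List.length_cons] at hl
      by_cases hp : old.isPrefixOf (c :: t)
      · simp only [hp, if_true]
        obtain ⟨o, os, rfl⟩ : ∃ o os, old = o :: os := by
          cases old with
          | nil => exact absurd rfl hold
          | cons o os => exact ⟨o, os, rfl⟩
        have hdrop : List.drop (o :: os).length (c :: t) = t.drop ((o :: os).length - 1) := by
          simp
        rw [hdrop, ih _ _ (le_trans (by simp [List.length_drop]; omega) (le_refl n))]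
        rw [pvRepl, if_pos hp]
        simp
      · simp only [hp]
        rw [ih t (c :: acc) (by omega)]
        rw [pvRepl, if_neg hp]
        simp

lemma replace_eq (s old new : List Char) (hold : old ≠ []) :
    PySem.Chars.replace s old new = pvRepl old new s := by
  rw [PySem.Chars.replace]
  have : old.isEmpty = false := by simp [hold]
  rw [this]
  simp only [Bool.false_eq_true, if_false]
  rw [go_eq old new hold s.length s [] le_rfl]
  simp

-- the pattern fires at the front
lemma pvRepl_fire (old new X : List Char) (hold : old ≠ []) :
    pvRepl old new (old ++ X) = new ++ pvRepl old new X := by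
  obtain ⟨o, os, rfl⟩ : ∃ o os, old = o :: os := by
    cases old with
    | nil => exact absurd rfl hold
    | cons o os => exact ⟨o, os, rfl⟩
  have hp : (o :: os).isPrefixOf (o :: (os ++ X)) = true := by
    rw [List.isPrefixOf_iff_prefix, ← List.cons_append]
    exact List.prefix_append _ _
  rw [List.cons_append, pvRepl, if_pos hp]
  simp

-- no occurrence at the front: step one character
lemma pvRepl_step (old new : List Char) (c : Char) (t : List Char) (h : ¬ old <+: (c :: t)) :
    pvRepl old new (c :: t) = c :: pvRepl old new t := by
  rw [pvRepl, if_neg (by rw [Bool.not_eq_true]; exact isPrefixOf_false h)]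

-- the pattern never starts inside p (pcross p old): replacing distributes over p ++ X
lemma pvRepl_distrib (old new : List Char) :
    ∀ (p X : List Char), pcross p old = true → pvRepl old new (p ++ X) = p ++ pvRepl old new X := by
  intro p
  induction p with
  | nil => intro X _; simp
  | cons q p' ih =>
    intro X hpc
    have h0 := pcross_spec hpc (d := 0) (by simp)
    simp only [List.drop_zero] at h0
    have hnp : ¬ old <+: q :: (p' ++ X) := by
      rw [← List.cons_append]; exact not_prefix_append X h0.2 h0.1
    rw [List.cons_append, pvRepl_step old new q _ hnp, ih X (pcross_tail hpc)]
    rfl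

-- replacing old by v cannot create a new occurrence of a (nonempty) suffix q of K at the
-- front of the output if there was none at the front of the input (pcross K v)
lemma pvRepl_no_new (old v K : List Char) (hpc : pcross K v = true) :
    ∀ (n : Nat) (w q : List Char), w.length ≤ n → q <:+ K → q ≠ [] → ¬ q <+: w →
      ¬ q <+: pvRepl old v w := by
  intro n
  induction n with
  | zero =>
    intro w q hw hsuf hne _
    have : w = [] := List.length_eq_zero_iff.mp (Nat.le_zero.mp hw)
    subst this
    rw [show pvRepl old v [] = [] from by rw [pvRepl]]
    intro h
    exact hne (List.prefix_nil.mp h)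
  | succ n ih =>
    intro w q hw hsuf hne hnp
    cases w with
    | nil =>
      rw [show pvRepl old v [] = [] from by rw [pvRepl]]
      intro h
      exact hne (List.prefix_nil.mp h)
    | cons c t =>
      simp only [List.length_cons] at hw
      by_cases hp : old.isPrefixOf (c :: t)
      · rw [pvRepl, if_pos hp]
        intro hq
        have hd : q = K.drop (K.length - q.length) := List.suffix_iff_eq_drop.mp hsuf
        have hlt : K.length - q.length < K.length := by
          have h1 : 0 < q.length := List.length_pos_iff.mpr hne
          have h2 : q.length ≤ K.length := hsuf.length_le
          omega
        have hspec := pcross_spec hpc hlt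
        rcases List.prefix_or_prefix_of_prefix hq (List.prefix_append v _) with h' | h'
        · exact hspec.1 (hd ▸ h')
        · exact hspec.2 (hd ▸ h')
      · rw [pvRepl, if_neg hp]
        intro hq
        cases q with
        | nil => exact hne rfl
        | cons qc q' =>
          rw [List.cons_prefix_cons] at hq
          obtain ⟨rfl, hq'⟩ := hq
          by_cases hq'nil : q' = []
          · subst hq'nil
            exact hnp (List.cons_prefix_cons.mpr ⟨rfl, List.nil_prefix⟩)
          · have hnp' : ¬ q' <+: t := fun h => hnp (List.cons_prefix_cons.mpr ⟨rfl, h⟩)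
            have hsuf' : q' <:+ K := (List.suffix_cons qc q').trans hsuf
            exact ih t q' (by omega) hsuf' hq'nil hnp' hq'

-- A's four sequential replaces, innermost first
def pvChain (s : List Char) : List Char :=
  pvRepl pvK4 pvV4 (pvRepl pvK3 pvV3 (pvRepl pvK2 pvV2 (pvRepl pvK1 pvV1 s)))

lemma pvChain_nil : pvChain [] = [] := by
  unfold pvChain
  rw [show pvRepl pvK1 pvV1 [] = [] from by rw [pvRepl]]
  rw [show pvRepl pvK2 pvV2 [] = [] from by rw [pvRepl]]
  rw [show pvRepl pvK3 pvV3 [] = [] from by rw [pvRepl]]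
  rw [show pvRepl pvK4 pvV4 [] = [] from by rw [pvRepl]]

lemma pvChain_k1 (X : List Char) : pvChain (pvK1 ++ X) = pvV1 ++ pvChain X := by
  unfold pvChain
  rw [pvRepl_fire pvK1 pvV1 X (by decide),
    pvRepl_distrib pvK2 pvV2 pvV1 _ (by decide),
    pvRepl_distrib pvK3 pvV3 pvV1 _ (by decide),
    pvRepl_distrib pvK4 pvV4 pvV1 _ (by decide)]

lemma pvChain_k2 (X : List Char) : pvChain (pvK2 ++ X) = pvV2 ++ pvChain X := by
  unfold pvChain
  rw [pvRepl_distrib pvK1 pvV1 pvK2 X (by decide),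
    pvRepl_fire pvK2 pvV2 _ (by decide),
    pvRepl_distrib pvK3 pvV3 pvV2 _ (by decide),
    pvRepl_distrib pvK4 pvV4 pvV2 _ (by decide)]

lemma pvChain_k3 (X : List Char) : pvChain (pvK3 ++ X) = pvV3 ++ pvChain X := by
  unfold pvChain
  rw [pvRepl_distrib pvK1 pvV1 pvK3 X (by decide),
    pvRepl_distrib pvK2 pvV2 pvK3 _ (by decide),
    pvRepl_fire pvK3 pvV3 _ (by decide),
    pvRepl_distrib pvK4 pvV4 pvV3 _ (by decide)]

lemma pvChain_k4 (X : List Char) : pvChain (pvK4 ++ X) = pvV4 ++ pvChain X := by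
  unfold pvChain
  rw [pvRepl_distrib pvK1 pvV1 pvK4 X (by decide),
    pvRepl_distrib pvK2 pvV2 pvK4 _ (by decide),
    pvRepl_distrib pvK3 pvV3 pvK4 _ (by decide),
    pvRepl_fire pvK4 pvV4 _ (by decide)]

lemma pvChain_nofire (c : Char) (t : List Char)
    (h1 : ¬ pvK1 <+: (c :: t)) (h2 : ¬ pvK2 <+: (c :: t))
    (h3 : ¬ pvK3 <+: (c :: t)) (h4 : ¬ pvK4 <+: (c :: t)) :
    pvChain (c :: t) = c :: pvChain t := by
  unfold pvChain
  rw [pvRepl_step pvK1 pvV1 c t h1]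
  have h2' : ¬ pvK2 <+: c :: pvRepl pvK1 pvV1 t := by
    intro h
    rw [show pvK2 = 'u' :: pvK2.tail from rfl, List.cons_prefix_cons] at h h2
    obtain ⟨rfl, hT⟩ := h
    exact pvRepl_no_new pvK1 pvV1 pvK2 (by decide) t.length t pvK2.tail le_rfl
      (by decide) (by decide) (fun ht => h2 ⟨rfl, ht⟩) hT
  rw [pvRepl_step pvK2 pvV2 _ _ h2']
  have h3' : ¬ pvK3 <+: c :: pvRepl pvK2 pvV2 (pvRepl pvK1 pvV1 t) := by
    intro h
    rw [show pvK3 = 'l' :: pvK3.tail from rfl, List.cons_prefix_cons] at h h3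
    obtain ⟨rfl, hT⟩ := h
    have s1 : ¬ pvK3.tail <+: pvRepl pvK1 pvV1 t :=
      pvRepl_no_new pvK1 pvV1 pvK3 (by decide) t.length t pvK3.tail le_rfl
        (by decide) (by decide) (fun ht => h3 ⟨rfl, ht⟩)
    exact pvRepl_no_new pvK2 pvV2 pvK3 (by decide) (pvRepl pvK1 pvV1 t).length _ pvK3.tail
      le_rfl (by decide) (by decide) s1 hT
  rw [pvRepl_step pvK3 pvV3 _ _ h3']
  have h4' : ¬ pvK4 <+: c :: pvRepl pvK3 pvV3 (pvRepl pvK2 pvV2 (pvRepl pvK1 pvV1 t)) := by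
    intro h
    rw [show pvK4 = 'i' :: pvK4.tail from rfl, List.cons_prefix_cons] at h h4
    obtain ⟨rfl, hT⟩ := h
    have s1 : ¬ pvK4.tail <+: pvRepl pvK1 pvV1 t :=
      pvRepl_no_new pvK1 pvV1 pvK4 (by decide) t.length t pvK4.tail le_rfl
        (by decide) (by decide) (fun ht => h4 ⟨rfl, ht⟩)
    have s2 : ¬ pvK4.tail <+: pvRepl pvK2 pvV2 (pvRepl pvK1 pvV1 t) :=
      pvRepl_no_new pvK2 pvV2 pvK4 (by decide) (pvRepl pvK1 pvV1 t).length _ pvK4.tail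
        le_rfl (by decide) (by decide) s1
    exact pvRepl_no_new pvK3 pvV3 pvK4 (by decide)
      (pvRepl pvK2 pvV2 (pvRepl pvK1 pvV1 t)).length _ pvK4.tail
      le_rfl (by decide) (by decide) s2 hT
  rw [pvRepl_step pvK4 pvV4 _ _ h4']

lemma renameGo_nil : renameGo [] = [] := by
  rw [renameGo]

lemma renameGo_k1 (X : List Char) : renameGo (pvK1 ++ X) = pvV1 ++ renameGo X := by
  have hj : pvK1.isPrefixOf (pvK1 ++ X) = true :=
    List.isPrefixOf_iff_prefix.mpr (List.prefix_append _ _)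
  have hfind : pvMapB.find? (fun kv => kv.1.isPrefixOf (pvK1 ++ X)) = some (pvK1, pvV1) := by
    simp [pvMapB, hj]
  rw [show pvK1 ++ X = 'B' :: (pvK1.tail ++ X) from rfl, renameGo_cons]
  rw [show ('B' :: (pvK1.tail ++ X)) = pvK1 ++ X from rfl, hfind]
  show pvV1 ++ renameGo ((pvK1.tail ++ X).drop (pvK1.length - 1)) = _
  rw [show pvK1.length - 1 = pvK1.tail.length from rfl, List.drop_left]

lemma renameGo_k2 (X : List Char) : renameGo (pvK2 ++ X) = pvV2 ++ renameGo X := by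
  have hb1 : pvK1.isPrefixOf (pvK2 ++ X) = false :=
    isPrefixOf_false (not_prefix_append X (by decide) (by decide))
  have hj : pvK2.isPrefixOf (pvK2 ++ X) = true :=
    List.isPrefixOf_iff_prefix.mpr (List.prefix_append _ _)
  have hfind : pvMapB.find? (fun kv => kv.1.isPrefixOf (pvK2 ++ X)) = some (pvK2, pvV2) := by
    simp [pvMapB, List.find?, hb1, hj]
  rw [show pvK2 ++ X = 'u' :: (pvK2.tail ++ X) from rfl, renameGo_cons]
  rw [show ('u' :: (pvK2.tail ++ X)) = pvK2 ++ X from rfl, hfind]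
  show pvV2 ++ renameGo ((pvK2.tail ++ X).drop (pvK2.length - 1)) = _
  rw [show pvK2.length - 1 = pvK2.tail.length from rfl, List.drop_left]

lemma renameGo_k3 (X : List Char) : renameGo (pvK3 ++ X) = pvV3 ++ renameGo X := by
  have hb1 : pvK1.isPrefixOf (pvK3 ++ X) = false :=
    isPrefixOf_false (not_prefix_append X (by decide) (by decide))
  have hb2 : pvK2.isPrefixOf (pvK3 ++ X) = false :=
    isPrefixOf_false (not_prefix_append X (by decide) (by decide))
  have hj : pvK3.isPrefixOf (pvK3 ++ X) = true :=
    List.isPrefixOf_iff_prefix.mpr (List.prefix_append _ _)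
  have hfind : pvMapB.find? (fun kv => kv.1.isPrefixOf (pvK3 ++ X)) = some (pvK3, pvV3) := by
    simp [pvMapB, List.find?, hb1, hb2, hj]
  rw [show pvK3 ++ X = 'l' :: (pvK3.tail ++ X) from rfl, renameGo_cons]
  rw [show ('l' :: (pvK3.tail ++ X)) = pvK3 ++ X from rfl, hfind]
  show pvV3 ++ renameGo ((pvK3.tail ++ X).drop (pvK3.length - 1)) = _
  rw [show pvK3.length - 1 = pvK3.tail.length from rfl, List.drop_left]

lemma renameGo_k4 (X : List Char) : renameGo (pvK4 ++ X) = pvV4 ++ renameGo X := by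
  have hb1 : pvK1.isPrefixOf (pvK4 ++ X) = false :=
    isPrefixOf_false (not_prefix_append X (by decide) (by decide))
  have hb2 : pvK2.isPrefixOf (pvK4 ++ X) = false :=
    isPrefixOf_false (not_prefix_append X (by decide) (by decide))
  have hb3 : pvK3.isPrefixOf (pvK4 ++ X) = false :=
    isPrefixOf_false (not_prefix_append X (by decide) (by decide))
  have hj : pvK4.isPrefixOf (pvK4 ++ X) = true :=
    List.isPrefixOf_iff_prefix.mpr (List.prefix_append _ _)
  have hfind : pvMapB.find? (fun kv => kv.1.isPrefixOf (pvK4 ++ X)) = some (pvK4, pvV4) := by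
    simp [pvMapB, List.find?, hb1, hb2, hb3, hj]
  rw [show pvK4 ++ X = 'i' :: (pvK4.tail ++ X) from rfl, renameGo_cons]
  rw [show ('i' :: (pvK4.tail ++ X)) = pvK4 ++ X from rfl, hfind]
  show pvV4 ++ renameGo ((pvK4.tail ++ X).drop (pvK4.length - 1)) = _
  rw [show pvK4.length - 1 = pvK4.tail.length from rfl, List.drop_left]

lemma renameGo_nofire (c : Char) (t : List Char)
    (h1 : ¬ pvK1 <+: (c :: t)) (h2 : ¬ pvK2 <+: (c :: t))
    (h3 : ¬ pvK3 <+: (c :: t)) (h4 : ¬ pvK4 <+: (c :: t)) :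
    renameGo (c :: t) = c :: renameGo t := by
  have hfind : pvMapB.find? (fun kv => kv.1.isPrefixOf (c :: t)) = none := by
    simp [pvMapB, List.find?, isPrefixOf_false h1, isPrefixOf_false h2,
      isPrefixOf_false h3, isPrefixOf_false h4]
  rw [renameGo_cons, hfind]

lemma pvMain : ∀ (n : Nat) (s : List Char), s.length ≤ n → pvChain s = renameGo s := by
  intro n
  induction n with
  | zero =>
    intro s hs
    have : s = [] := List.length_eq_zero_iff.mp (Nat.le_zero.mp hs)
    subst this
    rw [pvChain_nil, renameGo_nil]
  | succ n ih =>
    intro s hs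
    by_cases h1 : pvK1 <+: s
    · obtain ⟨X, rfl⟩ := h1
      rw [pvChain_k1, renameGo_k1, ih X (by simp [pvK1] at hs ⊢; omega)]
    by_cases h2 : pvK2 <+: s
    · obtain ⟨X, rfl⟩ := h2
      rw [pvChain_k2, renameGo_k2, ih X (by simp [pvK2] at hs ⊢; omega)]
    by_cases h3 : pvK3 <+: s
    · obtain ⟨X, rfl⟩ := h3
      rw [pvChain_k3, renameGo_k3, ih X (by simp [pvK3] at hs ⊢; omega)]
    by_cases h4 : pvK4 <+: s
    · obtain ⟨X, rfl⟩ := h4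
      rw [pvChain_k4, renameGo_k4, ih X (by simp [pvK4] at hs ⊢; omega)]
    cases s with
    | nil => rw [pvChain_nil, renameGo_nil]
    | cons c t =>
      rw [pvChain_nofire c t h1 h2 h3 h4, renameGo_nofire c t h1 h2 h3 h4]
      simp only [List.length_cons] at hs
      rw [ih t (by omega)]

-- ===== VERDICT (by name: the statement is the Claim_ definition above) =====
theorem rename_variables_spec : Claim_equal_rename_variables := by
  intro content _
  unfold Spec_rename_variables rename_variables rename_variables_alt
  rw [← String.toList_inj]
  simp only [List.foldl, String.toList_ofList]
  rw [PySem.Str.toList_replace, PySem.Str.toList_replace, PySem.Str.toList_replace,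
    PySem.Str.toList_replace]
  rw [show ("BoolFlag" : String).toList = pvK1 from by decide,
    show ("ResourceCleanupFlag" : String).toList = pvV1 from by decide,
    show ("uStackX_24" : String).toList = pvK2 from by decide,
    show ("StackParameterHigh" : String).toList = pvV2 from by decide,
    show ("lStack0000000000000028" : String).toList = pvK3 from by decide,
    show ("StackParameterLow" : String).toList = pvV3 from by decide,
    show ("in_XMM0_Qb" : String).toList = pvK4 from by decide,
    show ("Xmm0Parameter" : String).toList = pvV4 from by decide]
  rw [replace_eq _ _ _ (by decide), replace_eq _ _ _ (by decide),
    replace_eq _ _ _ (by decide), replace_eq _ _ _ (by decide)]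
  exact pvMain content.toList.length content.toList le_rfl
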